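-- pv_equiv track=rewrite | github.com/ashioyajotham/Coding-Challenges-Interviews | Spring 2019/roblox.py | minPower
-- ===== SOURCE A (Python) =====
-- def minPower(p):
--     # Write your code here
--
--     result = [0] * len(p)
--
--     running_sum = 0
--     for i in range(len(p)):
--         running_sum += p[i]
--         result[i] = running_sum
--
--     answer = min(result)
--
--     if answer < 0:
--         return -answer + 1
--     else:
--         return answer + 1
-- ===== SOURCE B (Python) =====
-- def minPower(p):
--     # Back-to-front scan; no prefix sums are ever formed.  Invariant: m is the
--     # minimum prefix sum of the suffix scanned so far, via min(x, x + m).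
--     m = p[-1]
--     for x in reversed(p[:-1]):
--         m = min(x, x + m)
--     return (-m if m < 0 else m) + 1
-- ===== Notes on version B (the rewrite author's own statement) =====
-- stated objective: alternative
-- what changed: B never computes prefix sums: it scans the list back-to-front maintaining m = min(x, x + m) (the minimum prefix sum of the scanned suffix, correct by distributivity of + over min), instead of A's forward prefix-sum array plus a min() pass.
import Mathlib
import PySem

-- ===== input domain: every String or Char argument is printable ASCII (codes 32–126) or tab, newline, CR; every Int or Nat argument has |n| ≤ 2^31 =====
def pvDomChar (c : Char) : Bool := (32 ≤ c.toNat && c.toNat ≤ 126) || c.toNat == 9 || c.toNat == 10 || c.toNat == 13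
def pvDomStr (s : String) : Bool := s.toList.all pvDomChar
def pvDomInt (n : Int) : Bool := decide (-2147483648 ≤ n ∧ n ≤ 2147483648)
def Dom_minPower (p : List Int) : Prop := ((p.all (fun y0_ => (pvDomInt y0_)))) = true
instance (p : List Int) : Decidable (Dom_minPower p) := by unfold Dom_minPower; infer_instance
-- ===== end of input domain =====

-- B replaces A's forward prefix-sum array + min() pass by a back-to-front scan with the
-- recurrence m = min(x, x + m); no prefix sums are formed (objective: alternative).

-- ===== PORT A =====
-- A's loop over range(len(p)) accumulating running_sum and filling result[i]:
-- ported as a fold over p carrying (running_sum, result-so-far); then min, then the branch.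
def minPower (p : List Int) : Int :=
  let st := p.foldl (fun (st : Int × List Int) x =>
    (st.1 + x, st.2 ++ [st.1 + x])) (0, [])
  match PySem.List.min? st.2 (fun y => y) with   -- min([]) raises ValueError: excluded by Pre_
  | some answer => if answer < 0 then -answer + 1 else answer + 1
  | none => 0

-- ===== PORT B =====
-- m = p[-1]; for x in reversed(p[:-1]): m = min(x, x + m)
def minPower_alt (p : List Int) : Int :=
  match p.getLast? with
  | none => 0          -- p[-1] raises IndexError on []: excluded by Pre_
  | some last =>
    let m := (p.dropLast.reverse).foldl (fun m x => min x (x + m)) last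
    (if m < 0 then -m else m) + 1

-- ===== PRECONDITION & SPEC =====
-- A raises ValueError on the empty list (min of an empty sequence); B raises IndexError there.
def Pre_minPower (p : List Int) : Prop := p ≠ []
instance (p : List Int) : Decidable (Pre_minPower p) := by unfold Pre_minPower; infer_instance
def pvWitness_minPower : List Int := [2, -5, 3]

def Spec_minPower (p : List Int) (out : Int) : Prop := out = minPower_alt p
instance (p : List Int) (out : Int) : Decidable (Spec_minPower p out) := by unfold Spec_minPower; infer_instance

-- ===== CLAIM (what is proved, stated in full; the proofs are below) =====
def Claim_equal_minPower : Prop := ∀ (p : List Int), Dom_minPower p → Pre_minPower p → Spec_minPower p (minPower p)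

-- ===== LEMMAS AND PROOFS =====

-- prefix sums of p starting after an already-accumulated sum s (specification device)
def presums : List Int → Int → List Int
  | [], _ => []
  | x :: xs, s => (s + x) :: presums xs (s + x)

-- minimum prefix sum of a nonempty list, by the right-to-left recurrence
def mps : List Int → Int
  | [] => 0
  | [x] => x
  | x :: y :: ys => min x (x + mps (y :: ys))

-- A's fold appends exactly the prefix sums to the accumulated result list.
theorem foldA_eq (p : List Int) (s : Int) (acc : List Int) :
    p.foldl (fun (st : Int × List Int) x => (st.1 + x, st.2 ++ [st.1 + x])) (s, acc)
      = (s + p.sum, acc ++ presums p s) := by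
  induction p generalizing s acc with
  | nil => simp [presums]
  | cons x xs ih => simp [List.foldl, presums, ih, add_assoc]

theorem foldl_min_min (l : List Int) (a b : Int) :
    l.foldl min (min a b) = min a (l.foldl min b) := by
  induction l generalizing b with
  | nil => rfl
  | cons x xs ih =>
    simp only [List.foldl]
    rw [min_assoc, ih]

-- shifting every prefix sum by s shifts mps by s
theorem mps_shift (ys : List Int) (s y : Int) :
    mps ((s + y) :: ys) = s + mps (y :: ys) := by
  cases ys with
  | nil => rfl
  | cons z zs =>
    simp only [mps]
    omega

-- the running-min over prefix sums equals the right-to-left recurrence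
theorem foldl_min_presums (xs : List Int) (x : Int) :
    (presums xs x).foldl min x = mps (x :: xs) := by
  induction xs generalizing x with
  | nil => rfl
  | cons y ys ih =>
    simp only [presums, List.foldl]
    rw [foldl_min_min, ih, mps_shift]
    rfl

-- B's backward fold computes mps of the whole list
theorem foldr_mps (l : List Int) (last : Int) :
    l.foldr (fun x m => min x (x + m)) last = mps (l ++ [last]) := by
  induction l with
  | nil => rfl
  | cons x l ih =>
    simp only [List.foldr, ih]
    cases l with
    | nil => rfl
    | cons a r => rfl

-- ===== VERDICT (by name: the statement is the Claim_ definition above) =====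
theorem minPower_spec : Claim_equal_minPower := by
  intro p _ hpre
  unfold Spec_minPower
  cases p with
  | nil => exact absurd rfl hpre
  | cons x xs =>
    unfold minPower minPower_alt
    rw [foldA_eq]
    simp only [List.nil_append, presums, zero_add]
    rw [PySem.List.min?_id_cons, foldl_min_presums]
    have hlast : (x :: xs).getLast? = some ((x :: xs).getLast (by simp)) :=
      List.getLast?_eq_some_getLast (by simp)
    rw [hlast]
    simp only [List.foldl_reverse]
    rw [foldr_mps, List.dropLast_append_getLast (by simp : x :: xs ≠ [])]
    set m := mps (x :: xs)
    rcases lt_or_ge m 0 with h | h <;> simp [h, not_lt.mpr]
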